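-- pv_equiv track=rewrite | github.com/qianbujun/touhouhanafuda | guibackup.py | can_form_perfect_match
-- ===== SOURCE A (Python) =====
-- def can_form_perfect_match(matrix):
--     n = len(matrix)
--     used = [False] * n
--     def backtrack(pairs_count, start_index):
--         if pairs_count == 4:
--             return True
--         if start_index >= n -1: # Not enough cards left to form more pairs
--             return False
--
--         # Find the first unused card
--         first_available = -1
--         for i in range(start_index, n):
--             if not used[i]:
--                 first_available = i
--                 break
--
--         if first_available == -1: # No unused cards left, but haven't formed 4 pairs
--              return False
--
--         used[first_available] = True
--         for j in range(first_available + 1, n):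
--             if not used[j] and matrix[first_available][j] == 1:
--                 used[j] = True
--                 if backtrack(pairs_count + 1, first_available + 1):
--                     return True
--                 used[j] = False # backtrack
--         used[first_available] = False # backtrack
--
--         # Try skipping the current 'first_available' card if it couldn't form a pair
--         # This ensures we explore all possibilities even if a card cannot be paired from its current position
--         if backtrack(pairs_count, first_available + 1):
--              return True
--
--         return False
--     return backtrack(0,0)
-- ===== SOURCE B (Python) =====
-- def can_form_perfect_match(matrix):
--     # Alternative strategy: collect the edge list once from the upper triangle,
--     # then do an include/exclude recursion over the edges with an immutable set
--     # of used vertices, stopping as soon as 4 disjoint edges are found.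
--     n = len(matrix)
--     edges = [(i, j) for i in range(n) for j in range(i + 1, n) if matrix[i][j] == 1]
--
--     def pick(edges, used, need):
--         if need == 0:
--             return True
--         if not edges:
--             return False
--         (a, b), rest = edges[0], edges[1:]
--         if a not in used and b not in used:
--             if pick(rest, used | {a, b}, need - 1):
--                 return True
--         return pick(rest, used, need)
--
--     return pick(edges, frozenset(), 4)
-- ===== Notes on version B (the rewrite author's own statement) =====
-- stated objective: alternative
-- what changed: A backtracks vertex-by-vertex over the adjacency matrix with a mutable `used` array (pair the first free vertex or skip it); B builds the upper-triangle edge list once and runs an include/exclude recursion over edges with an immutable vertex set, stopping at 4 disjoint edges.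
import Mathlib
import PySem

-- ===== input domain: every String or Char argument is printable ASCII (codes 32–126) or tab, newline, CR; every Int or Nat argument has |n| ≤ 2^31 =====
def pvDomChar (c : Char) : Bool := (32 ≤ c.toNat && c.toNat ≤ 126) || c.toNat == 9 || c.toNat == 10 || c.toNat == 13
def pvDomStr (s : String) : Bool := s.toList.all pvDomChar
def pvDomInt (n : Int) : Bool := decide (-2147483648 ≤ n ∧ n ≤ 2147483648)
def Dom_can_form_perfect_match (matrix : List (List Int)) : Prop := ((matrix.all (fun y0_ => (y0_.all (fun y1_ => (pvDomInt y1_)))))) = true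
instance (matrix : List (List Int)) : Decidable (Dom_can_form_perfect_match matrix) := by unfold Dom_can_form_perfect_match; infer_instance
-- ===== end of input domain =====

-- B replaces A's vertex-by-vertex backtracking over a mutable `used` array by an
-- include/exclude recursion over the upper-triangle edge list; objective: alternative.

-- ===== PORT A =====
-- Python's inner `for i in range(start_index, n): if not used[i]: …break`.
-- `used` always has length n and i < n, so `getD … false` reads exactly used[i].
def pvA_first (used : List Bool) (i n : Nat) : Option Nat :=
  if _h : i < n then
    if used.getD i false = false then some i else pvA_first used (i + 1) n
  else none
termination_by n - i

-- needed by pvA_back's termination: the found index lies in [i, n)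
theorem pvA_first_le (used : List Bool) (i n fa : Nat)
    (h : pvA_first used i n = some fa) : i ≤ fa ∧ fa < n := by
  fun_induction pvA_first used i n with
  | case1 i hi hv => simp_all
  | case2 i hi hv ih => have := ih h; omega
  | case3 i hi => simp_all

-- `backtrack(pairs_count, start_index)` with the mutable `used` passed explicitly
-- (Python restores `used` on every backtrack, so passing it functionally is exact).
-- matrix[first_available][j]: first_available < n = len(matrix) is always in range;
-- the inner `getD … 0` defaults only where Python would raise IndexError on a short
-- row — exactly the inputs Pre_ excludes.
def pvA_back (matrix : List (List Int)) (n : Nat) (pc : Nat) (used : List Bool) (s : Nat) : Bool :=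
  if pc = 4 then true
  else if n ≤ s + 1 then false  -- start_index >= n - 1 (over Nat: s ≥ 0, n ≥ 0)
  else
    match hfa : pvA_first used s n with
    | none => false
    | some fa =>
      -- used[first_available] = True before the j-loop
      if (List.range' (fa + 1) (n - (fa + 1))).any (fun j =>
            if (used.set fa true).getD j false = false ∧ (matrix.getD fa []).getD j 0 = 1 then
              pvA_back matrix n (pc + 1) ((used.set fa true).set j true) (fa + 1)
            else false) then true
      else pvA_back matrix n pc used (fa + 1)  -- skip branch: `used` restored
termination_by n - s
decreasing_by
  all_goals (have := pvA_first_le used s n fa hfa; omega)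

def can_form_perfect_match (matrix : List (List Int)) : Bool :=
  pvA_back matrix matrix.length 0 (List.replicate matrix.length false) 0

-- ===== PORT B =====
-- the comprehension [(i, j) for i in range(n) for j in range(i+1, n) if matrix[i][j] == 1];
-- `getD … 0` defaults only where Python would raise IndexError (outside Pre_).
def pvB_edges (matrix : List (List Int)) : List (Nat × Nat) :=
  (List.range matrix.length).flatMap (fun i =>
    (List.range' (i + 1) (matrix.length - (i + 1))).filterMap (fun j =>
      if (matrix.getD i []).getD j 0 = 1 then some (i, j) else none))

-- `pick(edges, used, need)`; `used` is a Python frozenset of vertex indices.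
def pvB_pick (edges : List (Nat × Nat)) (used : PySem.Set Nat) (need : Nat) : Bool :=
  if need = 0 then true
  else
    match edges with
    | [] => false
    | (a, b) :: rest =>
      if PySem.Set.contains used a = false ∧ PySem.Set.contains used b = false then
        if pvB_pick rest (PySem.Set.add (PySem.Set.add used a) b) (need - 1) then true
        else pvB_pick rest used need
      else pvB_pick rest used need

def can_form_perfect_match_alt (matrix : List (List Int)) : Bool :=
  pvB_pick (pvB_edges matrix) PySem.Set.empty 4

-- ===== PRECONDITION & SPEC =====
-- Pre_ excludes ragged matrices (one of the first n-1 rows shorter than n), on which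
-- Python A reads matrix[i][j] out of range and (except for rare early-True runs,
-- cited in the claim) raises IndexError.
def Pre_can_form_perfect_match (matrix : List (List Int)) : Prop :=
  ∀ i : Nat, i < matrix.length - 1 → matrix.length ≤ (matrix.getD i []).length
instance (matrix : List (List Int)) : Decidable (Pre_can_form_perfect_match matrix) := by
  unfold Pre_can_form_perfect_match; infer_instance

def pvWitness_can_form_perfect_match : List (List Int) := [[0, 1], [1, 0]]

def Spec_can_form_perfect_match (matrix : List (List Int)) (out : Bool) : Prop :=
  out = can_form_perfect_match_alt matrix
instance (matrix : List (List Int)) (out : Bool) : Decidable (Spec_can_form_perfect_match matrix out) := by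
  unfold Spec_can_form_perfect_match; infer_instance

-- ===== CLAIM (what is proved, stated in full; the proofs are below) =====
def Claim_equal_can_form_perfect_match : Prop := ∀ (matrix : List (List Int)), Dom_can_form_perfect_match matrix → Pre_can_form_perfect_match matrix → Spec_can_form_perfect_match matrix (can_form_perfect_match matrix)

-- ===== LEMMAS AND PROOFS =====

-- two pairs are vertex-disjoint
def pvDisj (p q : Nat × Nat) : Prop :=
  p.1 ≠ q.1 ∧ p.1 ≠ q.2 ∧ p.2 ≠ q.1 ∧ p.2 ≠ q.2

-- `ps` is a matching of edges of `matrix` whose endpoints are ≥ s and unused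
def pvOk (matrix : List (List Int)) (n : Nat) (used : List Bool) (s : Nat)
    (ps : List (Nat × Nat)) : Prop :=
  ps.Pairwise pvDisj ∧
  ∀ p ∈ ps, s ≤ p.1 ∧ p.1 < p.2 ∧ p.2 < n ∧ used.getD p.1 false = false ∧
    used.getD p.2 false = false ∧ (matrix.getD p.1 []).getD p.2 0 = 1

theorem pv_getD_set (l : List Bool) (i k : Nat) (b v : Bool) :
    (l.set i b).getD k v = if k = i ∧ i < l.length then b else l.getD k v := by
  simp only [List.getD_eq_getElem?_getD, List.getElem?_set]
  rcases eq_or_ne i k with rfl | hne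
  · by_cases h2 : i < l.length <;>
      simp [h2, List.getElem?_eq_none_iff, Nat.le_of_not_lt]
  · simp [hne, Ne.symm hne]

theorem pv_unused_set (used : List Bool) (i x : Nat) (hi : i < used.length)
    (h : (used.set i true).getD x false = false) :
    x ≠ i ∧ used.getD x false = false := by
  rw [pv_getD_set] at h
  split at h
  · simp at h
  · next hcond =>
    exact ⟨fun hx => hcond ⟨hx, hi⟩, h⟩

theorem pvDisj_symm : Symmetric pvDisj := by
  rintro p q ⟨h1, h2, h3, h4⟩
  exact ⟨h1.symm, h3.symm, h2.symm, h4.symm⟩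

theorem pv_replicate_getD (n k : Nat) : (List.replicate n false).getD k false = false := by
  rcases Nat.lt_or_ge k n with h | h
  · simp [List.getD_eq_getElem?_getD, List.getElem?_replicate, h]
  · simp [List.getD_eq_getElem?_getD, List.getElem?_eq_none_iff, h]

theorem pvA_first_none (used : List Bool) (i n : Nat) (h : pvA_first used i n = none) :
    ∀ k, i ≤ k → k < n → used.getD k false = true := by
  fun_induction pvA_first used i n with
  | case1 i hi hv => simp_all
  | case2 i hi hv ih =>
    intro k hk1 hk2
    rcases Nat.eq_or_lt_of_le hk1 with rfl | hlt
    · simpa using hv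
    · exact ih h k hlt hk2
  | case3 i hi => intro k hk1 hk2; omega

theorem pvA_first_spec (used : List Bool) (i n fa : Nat) (h : pvA_first used i n = some fa) :
    used.getD fa false = false ∧ ∀ k, i ≤ k → k < fa → used.getD k false = true := by
  fun_induction pvA_first used i n with
  | case1 i hi hv =>
    simp only [Option.some.injEq] at h; subst h
    exact ⟨hv, fun k hk1 hk2 => by omega⟩
  | case2 i hi hv ih =>
    obtain ⟨h1, h2⟩ := ih h
    refine ⟨h1, fun k hk1 hk2 => ?_⟩
    rcases Nat.eq_or_lt_of_le hk1 with rfl | hlt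
    · simpa using hv
    · exact h2 k hlt hk2
  | case3 i hi => simp_all

theorem pvA_iff (k : Nat) (matrix : List (List Int)) (n pc : Nat) (used : List Bool) (s : Nat)
    (hk : n - s ≤ k) (hu : used.length = n) (hpc : pc ≤ 4) :
    pvA_back matrix n pc used s = true ↔
      ∃ ps, ps.length + pc = 4 ∧ pvOk matrix n used s ps := by
  induction k generalizing pc used s with
  | zero =>
    rw [pvA_back.eq_def]
    by_cases hpc4 : pc = 4
    · subst hpc4
      exact iff_of_true (by simp) ⟨[], by simp [pvOk]⟩
    · have hns : n ≤ s + 1 := by omega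
      rw [if_neg hpc4, if_pos hns]
      simp only [Bool.false_eq_true, false_iff]
      rintro ⟨ps, hlen, hpw, hmem⟩
      cases ps with
      | nil => simp at hlen; omega
      | cons p t =>
        obtain ⟨m1, m2, m3, -⟩ := hmem p (by simp)
        omega
  | succ k ih =>
    rw [pvA_back.eq_def]
    by_cases hpc4 : pc = 4
    · subst hpc4
      exact iff_of_true (by simp) ⟨[], by simp [pvOk]⟩
    · rw [if_neg hpc4]
      by_cases hns : n ≤ s + 1
      · rw [if_pos hns]
        simp only [Bool.false_eq_true, false_iff]
        rintro ⟨ps, hlen, hpw, hmem⟩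
        cases ps with
        | nil => simp at hlen; omega
        | cons p t =>
          obtain ⟨m1, m2, m3, -⟩ := hmem p (by simp)
          omega
      · rw [if_neg hns]
        split
        · next hfa =>
          simp only [Bool.false_eq_true, false_iff]
          rintro ⟨ps, hlen, hpw, hmem⟩
          cases ps with
          | nil => simp at hlen; omega
          | cons p t =>
            obtain ⟨m1, m2, m3, m4, -⟩ := hmem p (by simp)
            have := pvA_first_none used s n hfa p.1 m1 (by omega)
            rw [this] at m4; cases m4
        · next fa hfa =>
          obtain ⟨hsfa, hfan⟩ := pvA_first_le used s n fa hfa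
          obtain ⟨hfau, hmin⟩ := pvA_first_spec used s n fa hfa
          constructor
          · intro h
            split at h
            · next hany =>
              rw [List.any_eq_true] at hany
              obtain ⟨j, hjmem, hjc⟩ := hany
              rw [List.mem_range'_1] at hjmem
              split at hjc
              · next hcnd =>
                obtain ⟨hju, hedge⟩ := hcnd
                obtain ⟨hjfa, hjus⟩ := pv_unused_set used fa j (by omega) hju
                obtain ⟨ps, hlen, hpw, hmem⟩ :=
                  (ih (pc + 1) ((used.set fa true).set j true) (fa + 1) (by omega)
                    (by simp [hu]) (by omega)).mp hjc
                have hq : ∀ q ∈ ps, q.1 ≠ fa ∧ q.1 ≠ j ∧ q.2 ≠ fa ∧ q.2 ≠ j ∧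
                    used.getD q.1 false = false ∧ used.getD q.2 false = false := by
                  intro q hqm
                  obtain ⟨-, -, -, q4, q5, -⟩ := hmem q hqm
                  obtain ⟨hq1j, hq1u⟩ := pv_unused_set (used.set fa true) j q.1
                    (by simp [hu]; omega) q4
                  obtain ⟨hq1fa, hq1u'⟩ := pv_unused_set used fa q.1 (by omega) hq1u
                  obtain ⟨hq2j, hq2u⟩ := pv_unused_set (used.set fa true) j q.2
                    (by simp [hu]; omega) q5
                  obtain ⟨hq2fa, hq2u'⟩ := pv_unused_set used fa q.2 (by omega) hq2u
                  exact ⟨hq1fa, hq1j, hq2fa, hq2j, hq1u', hq2u'⟩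
                refine ⟨(fa, j) :: ps, by simp; omega, ?_, ?_⟩
                · refine List.pairwise_cons.mpr ⟨fun q hqm => ?_, hpw⟩
                  obtain ⟨d1, d2, d3, d4, -, -⟩ := hq q hqm
                  exact ⟨d1.symm, d3.symm, d2.symm, d4.symm⟩
                · intro p hp0
                  rcases List.mem_cons.mp hp0 with rfl | hp
                  · exact ⟨hsfa, by omega, by omega, hfau, hjus, hedge⟩
                  · obtain ⟨m1, m2, m3, -, -, m6⟩ := hmem p hp
                    obtain ⟨-, -, -, -, u1, u2⟩ := hq p hp
                    exact ⟨by omega, m2, m3, u1, u2, m6⟩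
              · simp at hjc
            · next =>
              obtain ⟨ps, hlen, hpw, hmem⟩ :=
                (ih pc used (fa + 1) (by omega) hu hpc).mp h
              refine ⟨ps, hlen, hpw, fun p hp => ?_⟩
              obtain ⟨m1, m2, m3, m4, m5, m6⟩ := hmem p hp
              exact ⟨by omega, m2, m3, m4, m5, m6⟩
          · rintro ⟨ps, hlen, hpw, hmem⟩
            by_cases hex : ∃ p ∈ ps, p.1 = fa ∨ p.2 = fa
            · obtain ⟨p, hpmem, hp⟩ := hex
              obtain ⟨m1, m2, m3, m4, m5, m6⟩ := hmem p hpmem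
              have hp1 : p.1 = fa := by
                rcases hp with h' | h'
                · exact h'
                · exfalso
                  have := hmin p.1 m1 (by omega)
                  rw [this] at m4; cases m4
              have hany : (List.range' (fa + 1) (n - (fa + 1))).any (fun j =>
                  if (used.set fa true).getD j false = false ∧
                      (matrix.getD fa []).getD j 0 = 1 then
                    pvA_back matrix n (pc + 1) ((used.set fa true).set j true) (fa + 1)
                  else false) = true := by
                rw [List.any_eq_true]
                refine ⟨p.2, List.mem_range'_1.mpr ⟨by omega, by omega⟩, ?_⟩
                have hcnd : (used.set fa true).getD p.2 false = false ∧
                    (matrix.getD fa []).getD p.2 0 = 1 := by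
                  constructor
                  · rw [pv_getD_set, if_neg (by rintro ⟨he, -⟩; omega)]
                    exact m5
                  · rw [← hp1]; exact m6
                rw [if_pos hcnd]
                refine (ih (pc + 1) ((used.set fa true).set p.2 true) (fa + 1) (by omega)
                  (by simp [hu]) (by omega)).mpr ?_
                have hlp : 0 < ps.length := List.length_pos_of_mem hpmem
                have hnodup : ps.Nodup :=
                  hpw.imp fun {a b} hd => fun he => hd.1 (by rw [he])
                refine ⟨ps.erase p, by rw [List.length_erase_of_mem hpmem]; omega, ?_, ?_⟩
                · exact hpw.sublist (List.erase_sublist ..)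
                · intro q hq
                  have hqps : q ∈ ps := List.mem_of_mem_erase hq
                  have hqnep : p ≠ q := by
                    intro hqp
                    exact (List.Nodup.not_mem_erase hnodup) (hqp ▸ hq)
                  have hdisj : pvDisj p q := hpw.forall pvDisj_symm hpmem hqps hqnep
                  obtain ⟨q1, q2, q3, q4, q5, q6⟩ := hmem q hqps
                  have hq1fa : q.1 ≠ fa := fun he => hdisj.1 (by omega)
                  have hge : fa ≤ q.1 := by
                    by_contra h'
                    have := hmin q.1 q1 (by omega)
                    rw [this] at q4; cases q4
                  refine ⟨by omega, q2, q3, ?_, ?_, q6⟩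
                  · rw [pv_getD_set, if_neg (by rintro ⟨he, -⟩; exact hdisj.2.2.1 he.symm),
                        pv_getD_set, if_neg (by rintro ⟨he, -⟩; exact hq1fa he)]
                    exact q4
                  · rw [pv_getD_set, if_neg (by rintro ⟨he, -⟩; exact hdisj.2.2.2 he.symm),
                        pv_getD_set, if_neg (by rintro ⟨he, -⟩; exact hdisj.2.1 (by omega))]
                    exact q5
              rw [if_pos hany]
            · have hskip : pvA_back matrix n pc used (fa + 1) = true := by
                refine (ih pc used (fa + 1) (by omega) hu hpc).mpr ⟨ps, hlen, hpw, ?_⟩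
                intro q hq
                obtain ⟨q1, q2, q3, q4, q5, q6⟩ := hmem q hq
                have hq1fa : q.1 ≠ fa := fun he => hex ⟨q, hq, Or.inl he⟩
                have hge : fa ≤ q.1 := by
                  by_contra h'
                  have := hmin q.1 q1 (by omega)
                  rw [this] at q4; cases q4
                exact ⟨by omega, q2, q3, q4, q5, q6⟩
              split
              · rfl
              · exact hskip

theorem pvB_iff (edges : List (Nat × Nat)) (used : PySem.Set Nat) (need : Nat) :
    pvB_pick edges used need = true ↔
      ∃ ps : List (Nat × Nat), ps.Sublist edges ∧ ps.length = need ∧ ps.Pairwise pvDisj ∧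
        ∀ p ∈ ps, p.1 ∉ used ∧ p.2 ∉ used := by
  induction edges generalizing used need with
  | nil =>
    rw [pvB_pick.eq_def]
    constructor
    · intro h
      split at h
      · next h0 => exact ⟨[], by simp [h0]⟩
      · simp at h
    · rintro ⟨ps, hs, hl, -, -⟩
      have hnil : ps = [] := List.sublist_nil.mp hs
      subst hnil
      simp at hl
      simp [← hl]
  | cons e rest ih =>
    obtain ⟨a, b⟩ := e
    rw [pvB_pick.eq_def]
    by_cases h0 : need = 0
    · subst h0
      exact iff_of_true (by simp) ⟨[], by simp⟩
    · simp only [if_neg h0]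
      constructor
      · intro h
        split at h
        · next hc =>
          have hna : a ∉ used := fun hm =>
            Bool.eq_false_iff.mp hc.1 ((PySem.Set.contains_iff used a).mpr hm)
          have hnb : b ∉ used := fun hm =>
            Bool.eq_false_iff.mp hc.2 ((PySem.Set.contains_iff used b).mpr hm)
          split at h
          · next hdeep =>
            obtain ⟨ps, hs, hl, hpw, hmem⟩ := (ih _ _).mp hdeep
            refine ⟨(a, b) :: ps, List.cons_sublist_cons.mpr hs, by simp [hl]; omega, ?_, ?_⟩
            · refine List.pairwise_cons.mpr ⟨fun q hq => ?_, hpw⟩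
              obtain ⟨hq1, hq2⟩ := hmem q hq
              simp only [PySem.Set.mem_add] at hq1 hq2
              push_neg at hq1 hq2
              exact ⟨fun he => hq1.1.2 he.symm, fun he => hq2.1.2 he.symm,
                     fun he => hq1.2 he.symm, fun he => hq2.2 he.symm⟩
            · intro p hp0
              rcases List.mem_cons.mp hp0 with rfl | hp
              · exact ⟨hna, hnb⟩
              · obtain ⟨hq1, hq2⟩ := hmem p hp
                simp only [PySem.Set.mem_add] at hq1 hq2
                push_neg at hq1 hq2
                exact ⟨hq1.1.1, hq2.1.1⟩
          · obtain ⟨ps, hs, hl, hpw, hmem⟩ := (ih _ _).mp h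
            exact ⟨ps, hs.cons _, hl, hpw, hmem⟩
        · next hc =>
          obtain ⟨ps, hs, hl, hpw, hmem⟩ := (ih _ _).mp h
          exact ⟨ps, hs.cons _, hl, hpw, hmem⟩
      · rintro ⟨ps, hs, hl, hpw, hmem⟩
        rcases List.sublist_cons_iff.mp hs with hrest | ⟨ps', rfl, hs'⟩
        · have htail : pvB_pick rest used need = true :=
            (ih used need).mpr ⟨ps, hrest, hl, hpw, hmem⟩
          split_ifs <;> simp [htail]
        · obtain ⟨hna, hnb⟩ := hmem (a, b) (by simp)
          have hc : PySem.Set.contains used a = false ∧ PySem.Set.contains used b = false := by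
            refine ⟨Bool.eq_false_iff.mpr fun hcon => ?_, Bool.eq_false_iff.mpr fun hcon => ?_⟩
            · exact hna ((PySem.Set.contains_iff used a).mp hcon)
            · exact hnb ((PySem.Set.contains_iff used b).mp hcon)
          have hdeep : pvB_pick rest (PySem.Set.add (PySem.Set.add used a) b) (need - 1) = true := by
            refine (ih _ _).mpr ⟨ps', hs', by simp at hl; omega, (List.pairwise_cons.mp hpw).2, ?_⟩
            intro p hp
            have hd := (List.pairwise_cons.mp hpw).1 p hp
            obtain ⟨h1, h2⟩ := hmem p (by simp [hp])
            simp only [PySem.Set.mem_add]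
            push_neg
            exact ⟨⟨⟨h1, fun he => hd.1 he.symm⟩, fun he => hd.2.2.1 he.symm⟩,
                   ⟨⟨h2, fun he => hd.2.1 he.symm⟩, fun he => hd.2.2.2 he.symm⟩⟩
          rw [if_pos hc, if_pos hdeep]

theorem pvB_edges_mem (matrix : List (List Int)) (p : Nat × Nat) :
    p ∈ pvB_edges matrix ↔
      p.1 < p.2 ∧ p.2 < matrix.length ∧ (matrix.getD p.1 []).getD p.2 0 = 1 := by
  obtain ⟨a, b⟩ := p
  simp only [pvB_edges, List.mem_flatMap, List.mem_range, List.mem_filterMap, List.mem_range'_1]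
  constructor
  · rintro ⟨i, hi, j, hj, hij⟩
    split at hij
    · simp only [Option.some.injEq, Prod.mk.injEq] at hij
      obtain ⟨rfl, rfl⟩ := hij
      refine ⟨by omega, by omega, by assumption⟩
    · simp at hij
  · rintro ⟨h1, h2, h3⟩
    exact ⟨a, by omega, b, by omega, by simp only [if_pos h3]⟩

theorem pv_A_eq_B (matrix : List (List Int)) :
    can_form_perfect_match matrix = can_form_perfect_match_alt matrix := by
  have hA := pvA_iff matrix.length matrix matrix.length 0
      (List.replicate matrix.length false) 0 (by omega) (by simp) (by omega)
  have hB := pvB_iff (pvB_edges matrix) PySem.Set.empty 4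
  rw [can_form_perfect_match, can_form_perfect_match_alt]
  have key : pvA_back matrix matrix.length 0 (List.replicate matrix.length false) 0 = true ↔
      pvB_pick (pvB_edges matrix) PySem.Set.empty 4 = true := by
    rw [hA, hB]
    constructor
    · rintro ⟨ps, hlen, hpw, hmem⟩
      have hnd : ps.Nodup := hpw.imp fun {p q} hd => fun he => hd.1 (by rw [he])
      have hsubset : ∀ x ∈ ps, x ∈ pvB_edges matrix := by
        intro p hp
        obtain ⟨-, m2, m3, -, -, m6⟩ := hmem p hp
        exact (pvB_edges_mem matrix p).mpr ⟨m2, m3, m6⟩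
      obtain ⟨qs, hqperm, hqsub⟩ := hnd.subperm hsubset
      refine ⟨qs, hqsub, by rw [hqperm.length_eq]; omega,
        (hqperm.pairwise_iff fun h => pvDisj_symm h).mpr hpw, by simp [PySem.Set.empty]⟩
    · rintro ⟨ps, hsl, hlen, hpw, -⟩
      refine ⟨ps, by omega, hpw, fun p hp => ?_⟩
      obtain ⟨m1, m2, m3⟩ := (pvB_edges_mem matrix p).mp (hsl.subset hp)
      exact ⟨Nat.zero_le _, m1, m2, pv_replicate_getD _ _, pv_replicate_getD _ _, m3⟩
  cases ha : pvA_back matrix matrix.length 0 (List.replicate matrix.length false) 0 with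
  | true => exact (key.mp ha).symm
  | false =>
    cases hb : pvB_pick (pvB_edges matrix) PySem.Set.empty 4 with
    | false => rfl
    | true => exact Bool.noConfusion ((key.mpr hb).symm.trans ha)

-- ===== VERDICT (by name: the statement is the Claim_ definition above) =====
theorem can_form_perfect_match_spec : Claim_equal_can_form_perfect_match := by
  intro matrix _ _
  unfold Spec_can_form_perfect_match
  exact pv_A_eq_B matrix
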